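-- pv_equiv track=rewrite | github.com/Pastells/eye_tracker_sexism | src/utils/mused.py | remap_span
-- ===== SOURCE A (Python) =====
-- def remap_span(start: int, end: int, mapping: dict) -> tuple[int, int] | None:
--     if not mapping:
--         return None
--
--     sorted_keys = sorted(mapping.keys())
--     max_key = sorted_keys[-1]
--
--     # Find nearest valid start (expand RIGHT)
--     new_start = None
--     for i in range(start, max_key + 1):
--         if i in mapping:
--             new_start = mapping[i]
--             break
--
--     # Find nearest valid end (expand LEFT)
--     new_end = None
--     for i in range(end - 1, start - 1, -1):
--         if i in mapping:
--             new_end = mapping[i] + 1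
--             break
--
--     if new_start is None or new_end is None or new_start >= new_end:
--         return None
--     return new_start, new_end
-- ===== SOURCE B (Python) =====
-- def remap_span(start: int, end: int, mapping: dict) -> tuple[int, int] | None:
--     # One pass over the dict keys: track the smallest key >= start and the
--     # largest key <= end - 1; no sort, no scan over the index range.
--     lo = None  # smallest key >= start
--     hi = None  # largest key <= end - 1
--     for k in mapping:
--         if k >= start and (lo is None or k < lo):
--             lo = k
--         if k <= end - 1 and (hi is None or hi < k):
--             hi = k
--     if lo is None or hi is None or hi < start:
--         return None
--     new_start = mapping[lo]
--     new_end = mapping[hi] + 1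
--     if new_start >= new_end:
--         return None
--     return new_start, new_end
-- ===== Notes on version B (the rewrite author's own statement) =====
-- stated objective: faster
-- what changed: B replaces A's sort of the keys plus two linear scans over the integer index range (up from start, down from end-1) by a single pass over the dict keys that tracks the smallest key >= start and the largest key <= end-1.
import Mathlib
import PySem

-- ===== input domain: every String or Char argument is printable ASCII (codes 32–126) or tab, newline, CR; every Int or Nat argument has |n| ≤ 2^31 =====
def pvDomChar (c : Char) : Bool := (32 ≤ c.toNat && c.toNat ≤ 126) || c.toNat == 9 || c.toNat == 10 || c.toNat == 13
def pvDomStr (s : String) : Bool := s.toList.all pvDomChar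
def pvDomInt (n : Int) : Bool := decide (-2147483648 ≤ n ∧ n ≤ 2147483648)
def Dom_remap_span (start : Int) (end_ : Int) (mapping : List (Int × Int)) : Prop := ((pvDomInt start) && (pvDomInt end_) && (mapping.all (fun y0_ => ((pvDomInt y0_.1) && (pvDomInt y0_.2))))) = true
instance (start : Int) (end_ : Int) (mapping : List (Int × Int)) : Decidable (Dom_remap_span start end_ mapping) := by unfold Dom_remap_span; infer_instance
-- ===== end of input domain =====

-- B replaces A's sort plus two scans over the integer index range by a single pass
-- over the dict keys that tracks the smallest key ≥ start and the largest key ≤ end-1.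

-- ===== PORT A =====
-- A scans range(start, max_key+1) upward and range(end-1, start-1, -1) downward for
-- the first mapped index; 'i in mapping' is (d.get? i).isSome, and mapping[i] (only
-- reached when i is in the dict) is (d.get? i).getD 0.
def remap_span (start : Int) (end_ : Int) (mapping : List (Int × Int)) : Option (Int × Int) :=
  let d := PySem.Dict.ofList mapping
  if d.items = [] then none
  else
    let sorted_keys := PySem.List.sorted d.keys (fun x => x) false
    let max_key := PySem.List.pyGetD sorted_keys (-1) 0   -- sorted_keys[-1]; nonempty here
    let new_start : Option Int :=
      ((PySem.List.pyRange start (max_key + 1) 1).find? (fun i => (d.get? i).isSome)).map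
        (fun i => (d.get? i).getD 0)
    let new_end : Option Int :=
      ((PySem.List.pyRange (end_ - 1) (start - 1) (-1)).find? (fun i => (d.get? i).isSome)).map
        (fun i => (d.get? i).getD 0 + 1)
    match new_start, new_end with
    | some ns, some ne => if ns ≥ ne then none else some (ns, ne)
    | _, _ => none

-- ===== PORT B =====
-- one fold over the keys; p.1 = lo (smallest key ≥ start so far), p.2 = hi (largest key ≤ end-1 so far)
def remap_span_alt (start : Int) (end_ : Int) (mapping : List (Int × Int)) : Option (Int × Int) :=
  let d := PySem.Dict.ofList mapping
  let st := d.keys.foldl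
    (fun (p : Option Int × Option Int) k =>
      ((if decide (start ≤ k) && p.1.all (fun l => decide (k < l)) then some k else p.1),
       (if decide (k ≤ end_ - 1) && p.2.all (fun h => decide (h < k)) then some k else p.2)))
    (none, none)
  match st.1 with
  | none => none
  | some lo =>
    match st.2 with
    | none => none
    | some hi =>
      if hi < start then none
      else
        let new_start := (d.get? lo).getD 0
        let new_end := (d.get? hi).getD 0 + 1
        if new_start ≥ new_end then none else some (new_start, new_end)

-- ===== PRECONDITION & SPEC =====
def Spec_remap_span (start : Int) (end_ : Int) (mapping : List (Int × Int)) (out : Option (Int × Int)) : Prop := out = remap_span_alt start end_ mapping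
instance (start : Int) (end_ : Int) (mapping : List (Int × Int)) (out : Option (Int × Int)) : Decidable (Spec_remap_span start end_ mapping out) := by unfold Spec_remap_span; infer_instance

-- ===== CLAIM (what is proved, stated in full; the proofs are below) =====
def Claim_equal_remap_span : Prop := ∀ (start : Int) (end_ : Int) (mapping : List (Int × Int)), Dom_remap_span start end_ mapping → Spec_remap_span start end_ mapping (remap_span start end_ mapping)

-- ===== LEMMAS AND PROOFS =====

-- the two components of B's fold, named for the proofs
def pvStep1 (start : Int) (a : Option Int) (k : Int) : Option Int :=
  if decide (start ≤ k) && a.all (fun l => decide (k < l)) then some k else a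
def pvStep2 (end_ : Int) (b : Option Int) (k : Int) : Option Int :=
  if decide (k ≤ end_ - 1) && b.all (fun h => decide (h < k)) then some k else b

lemma pvFold_pair (start end_ : Int) (ks : List Int) (a b : Option Int) :
    ks.foldl
      (fun (p : Option Int × Option Int) k =>
        ((if decide (start ≤ k) && p.1.all (fun l => decide (k < l)) then some k else p.1),
         (if decide (k ≤ end_ - 1) && p.2.all (fun h => decide (h < k)) then some k else p.2)))
      (a, b)
    = (ks.foldl (pvStep1 start) a, ks.foldl (pvStep2 end_) b) := by
  induction ks generalizing a b with
  | nil => rfl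
  | cons k ks ih =>
    simp only [List.foldl_cons]
    exact ih _ _

lemma pvFold1_none_iff (start : Int) (ks : List Int) (a : Option Int) :
    ks.foldl (pvStep1 start) a = none ↔ a = none ∧ ∀ k ∈ ks, ¬ start ≤ k := by
  induction ks generalizing a with
  | nil => simp
  | cons k ks ih =>
    simp only [List.foldl, ih, List.mem_cons]
    constructor
    · rintro ⟨h1, h2⟩
      unfold pvStep1 at h1
      split at h1
      · exact absurd h1 (by simp)
      · rename_i hc
        simp only [Bool.and_eq_true, decide_eq_true_eq, not_and] at hc
        refine ⟨h1, fun j hj => ?_⟩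
        rcases hj with rfl | hj
        · intro hs
          subst h1
          simp [hs] at hc
        · exact h2 j hj
    · rintro ⟨rfl, h2⟩
      have hk : ¬ start ≤ k := h2 k (Or.inl rfl)
      refine ⟨by simp [pvStep1, hk], fun j hj => h2 j (Or.inr hj)⟩

lemma pvFold1_some (start : Int) (ks : List Int) (a : Option Int) (m : Int)
    (h : ks.foldl (pvStep1 start) a = some m) :
    ((m ∈ ks ∧ start ≤ m) ∨ a = some m) ∧ (∀ k ∈ ks, start ≤ k → m ≤ k) ∧
      (∀ l, a = some l → m ≤ l) := by
  induction ks generalizing a with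
  | nil =>
    simp only [List.foldl] at h
    exact ⟨Or.inr h, by simp, fun l hl => by simp [h] at hl; omega⟩
  | cons k ks ih =>
    simp only [List.foldl] at h
    obtain ⟨h1, h2, h3⟩ := ih (pvStep1 start a k) h
    by_cases hs : pvStep1 start a k = some k ∧ start ≤ k
    · -- the accumulator became k (or already was k)
      have hmk : m ≤ k := h3 k hs.1
      refine ⟨?_, ?_, ?_⟩
      · rcases h1 with ⟨hm, hsm⟩ | hm
        · exact Or.inl ⟨List.mem_cons_of_mem _ hm, hsm⟩
        · rw [hm] at hs
          have hmk' : m = k := Option.some.inj hs.1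
          subst hmk'
          exact Or.inl ⟨List.mem_cons_self, hs.2⟩
      · intro j hj hjs
        rcases List.mem_cons.1 hj with rfl | hj
        · exact hmk
        · exact h2 j hj hjs
      · intro l hl
        unfold pvStep1 at hs
        rw [hl] at hs
        rcases hs with ⟨hs1, _⟩
        split at hs1
        · rename_i hc
          simp only [Bool.and_eq_true, decide_eq_true_eq, Option.all_some] at hc
          omega
        · simp at hs1; omega
    · -- the accumulator was left as a
      have ha : pvStep1 start a k = a ∨ (pvStep1 start a k = some k ∧ start ≤ k) := by
        unfold pvStep1
        split
        · rename_i hc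
          simp only [Bool.and_eq_true, decide_eq_true_eq] at hc
          exact Or.inr ⟨rfl, hc.1⟩
        · exact Or.inl rfl
      rcases ha with ha | ha
      · rw [ha] at h1 h3
        refine ⟨?_, ?_, h3⟩
        · rcases h1 with ⟨hm, hsm⟩ | hm
          · exact Or.inl ⟨List.mem_cons_of_mem _ hm, hsm⟩
          · exact Or.inr hm
        · intro j hj hjs
          rcases List.mem_cons.1 hj with rfl | hj
          · -- start ≤ j but the step kept a: then a = some l with l ≤ j, and m ≤ l
            rcases hA : a with _ | l
            · rw [hA] at ha
              simp [pvStep1, hjs] at ha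
            · have hml := h3 l hA
              by_cases hkl : j < l
              · rw [hA] at ha
                simp [pvStep1, hjs, hkl] at ha
                omega
              · omega
          · exact h2 j hj hjs
      · exact absurd ha hs

lemma pvFold2_none_iff (end_ : Int) (ks : List Int) (b : Option Int) :
    ks.foldl (pvStep2 end_) b = none ↔ b = none ∧ ∀ k ∈ ks, ¬ k ≤ end_ - 1 := by
  induction ks generalizing b with
  | nil => simp
  | cons k ks ih =>
    simp only [List.foldl, ih, List.mem_cons]
    constructor
    · rintro ⟨h1, h2⟩
      unfold pvStep2 at h1
      split at h1
      · exact absurd h1 (by simp)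
      · rename_i hc
        simp only [Bool.and_eq_true, decide_eq_true_eq, not_and] at hc
        refine ⟨h1, fun j hj => ?_⟩
        rcases hj with rfl | hj
        · intro hs
          subst h1
          simp [hs] at hc
        · exact h2 j hj
    · rintro ⟨rfl, h2⟩
      have hk : ¬ k ≤ end_ - 1 := h2 k (Or.inl rfl)
      refine ⟨by simp [pvStep2, hk], fun j hj => h2 j (Or.inr hj)⟩

lemma pvFold2_some (end_ : Int) (ks : List Int) (b : Option Int) (m : Int)
    (h : ks.foldl (pvStep2 end_) b = some m) :
    ((m ∈ ks ∧ m ≤ end_ - 1) ∨ b = some m) ∧ (∀ k ∈ ks, k ≤ end_ - 1 → k ≤ m) ∧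
      (∀ l, b = some l → l ≤ m) := by
  induction ks generalizing b with
  | nil =>
    simp only [List.foldl] at h
    exact ⟨Or.inr h, by simp, fun l hl => by simp [h] at hl; omega⟩
  | cons k ks ih =>
    simp only [List.foldl] at h
    obtain ⟨h1, h2, h3⟩ := ih (pvStep2 end_ b k) h
    by_cases hs : pvStep2 end_ b k = some k ∧ k ≤ end_ - 1
    · have hmk : k ≤ m := h3 k hs.1
      refine ⟨?_, ?_, ?_⟩
      · rcases h1 with ⟨hm, hsm⟩ | hm
        · exact Or.inl ⟨List.mem_cons_of_mem _ hm, hsm⟩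
        · rw [hm] at hs
          have hmk' : m = k := Option.some.inj hs.1
          subst hmk'
          exact Or.inl ⟨List.mem_cons_self, hs.2⟩
      · intro j hj hjs
        rcases List.mem_cons.1 hj with rfl | hj
        · exact hmk
        · exact h2 j hj hjs
      · intro l hl
        unfold pvStep2 at hs
        rw [hl] at hs
        rcases hs with ⟨hs1, _⟩
        split at hs1
        · rename_i hc
          simp only [Bool.and_eq_true, decide_eq_true_eq, Option.all_some] at hc
          omega
        · simp at hs1; omega
    · have hb : pvStep2 end_ b k = b ∨ (pvStep2 end_ b k = some k ∧ k ≤ end_ - 1) := by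
        unfold pvStep2
        split
        · rename_i hc
          simp only [Bool.and_eq_true, decide_eq_true_eq] at hc
          exact Or.inr ⟨rfl, hc.1⟩
        · exact Or.inl rfl
      rcases hb with hb | hb
      · rw [hb] at h1 h3
        refine ⟨?_, ?_, h3⟩
        · rcases h1 with ⟨hm, hsm⟩ | hm
          · exact Or.inl ⟨List.mem_cons_of_mem _ hm, hsm⟩
          · exact Or.inr hm
        · intro j hj hjs
          rcases List.mem_cons.1 hj with rfl | hj
          · -- j ≤ end-1 but the step kept b: then b = some l with j ≤ l, and l ≤ m
            rcases hB : b with _ | l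
            · rw [hB] at hb
              simp [pvStep2, hjs] at hb
            · have hml := h3 l hB
              by_cases hkl : l < j
              · rw [hB] at hb
                simp [pvStep2, hjs, hkl] at hb
                omega
              · omega
          · exact h2 j hj hjs
      · exact absurd hb hs

-- first element of an increasing range satisfying p
lemma pvFind_up_some_aux (p : Int → Bool) (n : Nat) :
    ∀ a b m : Int, a ≤ m → m < b → p m = true → (∀ i, a ≤ i → i < m → p i = false) →
      (m - a).toNat = n → (PySem.List.pyRange a b 1).find? p = some m := by
  induction n with
  | zero =>
    intro a b m ha hb hp _ hn
    have : a = m := by omega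
    subst this
    rw [PySem.List.pyRange_one_cons (by omega)]
    simp [List.find?, hp]
  | succ n ih =>
    intro a b m ha hb hp hmin hn
    have hma : a < m := by omega
    rw [PySem.List.pyRange_one_cons (by omega)]
    rw [List.find?_cons_of_neg (by simp [hmin a (le_refl a) hma])]
    exact ih (a + 1) b m (by omega) hb hp (fun i h1 h2 => hmin i (by omega) h2) (by omega)

lemma pvFind_up_some (p : Int → Bool) (a b m : Int) (ha : a ≤ m) (hb : m < b) (hp : p m = true)
    (hmin : ∀ i, a ≤ i → i < m → p i = false) :
    (PySem.List.pyRange a b 1).find? p = some m :=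
  pvFind_up_some_aux p (m - a).toNat a b m ha hb hp hmin rfl

lemma pvFind_up_none (p : Int → Bool) (a b : Int) (h : ∀ i, a ≤ i → i < b → p i = false) :
    (PySem.List.pyRange a b 1).find? p = none := by
  rw [List.find?_eq_none]
  intro x hx
  rw [PySem.List.mem_pyRange_one] at hx
  simp [h x hx.1 hx.2]

-- first element of a step -1 range satisfying p
lemma pvFind_down_some_aux (p : Int → Bool) (n : Nat) :
    ∀ a b m : Int, b < m → m ≤ a → p m = true → (∀ i, m < i → i ≤ a → p i = false) →
      (a - m).toNat = n → (PySem.List.pyRange a b (-1)).find? p = some m := by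
  induction n with
  | zero =>
    intro a b m hb ha hp _ hn
    have : a = m := by omega
    subst this
    rw [PySem.List.pyRange_neg_one_cons (by omega)]
    simp [List.find?, hp]
  | succ n ih =>
    intro a b m hb ha hp hmax hn
    have hma : m < a := by omega
    rw [PySem.List.pyRange_neg_one_cons (by omega)]
    rw [List.find?_cons_of_neg (by simp [hmax a hma (le_refl a)])]
    exact ih (a - 1) b m hb (by omega) hp (fun i h1 h2 => hmax i h1 (by omega)) (by omega)

lemma pvFind_down_some (p : Int → Bool) (a b m : Int) (hb : b < m) (ha : m ≤ a) (hp : p m = true)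
    (hmax : ∀ i, m < i → i ≤ a → p i = false) :
    (PySem.List.pyRange a b (-1)).find? p = some m :=
  pvFind_down_some_aux p (a - m).toNat a b m hb ha hp hmax rfl

lemma pvFind_down_none (p : Int → Bool) (a b : Int) (h : ∀ i, b < i → i ≤ a → p i = false) :
    (PySem.List.pyRange a b (-1)).find? p = none := by
  rw [List.find?_eq_none]
  intro x hx
  rw [PySem.List.mem_pyRange_neg_one] at hx
  simp [h x hx.1 hx.2]

-- membership in the dict's keys decides the port's predicate
lemma pvIsSome_iff (d : PySem.Dict Int Int) (i : Int) :
    (d.get? i).isSome = true ↔ i ∈ d.keys := by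
  rw [Option.isSome_iff_ne_none]
  constructor
  · intro h
    by_contra hm
    exact h ((PySem.Dict.get?_eq_none_iff_not_mem_keys d i).2 hm)
  · intro h hc
    exact ((PySem.Dict.get?_eq_none_iff_not_mem_keys d i).1 hc) h

-- the last element of the sorted key list bounds every key
lemma pvMaxKey_bound (ks : List Int) (hne : ks ≠ []) :
    (∀ k ∈ ks, k ≤ PySem.List.pyGetD (PySem.List.sorted ks (fun x => x) false) (-1) 0) ∧
      PySem.List.pyGetD (PySem.List.sorted ks (fun x => x) false) (-1) 0 ∈ ks := by
  have hsne : PySem.List.sorted ks (fun x => x) false ≠ [] := by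
    rw [Ne, PySem.List.sorted_eq_nil_iff]
    exact hne
  rw [PySem.List.pyGetD_neg_one _ 0 hsne]
  constructor
  · intro k hk
    have hk' : k ∈ PySem.List.sorted ks (fun x => x) false :=
      (PySem.List.mem_sorted ks (fun x => x) false k).2 hk
    obtain ⟨j, hj, hje⟩ := List.mem_iff_getElem.1 hk'
    rw [List.getLast_eq_getElem]
    calc k = (PySem.List.sorted ks (fun x => x) false)[j] := hje.symm
      _ ≤ (PySem.List.sorted ks (fun x => x) false)[(PySem.List.sorted ks (fun x => x) false).length - 1] :=
        PySem.List.sorted_id_getElem_mono ks (by omega) (by omega)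
  · exact (PySem.List.mem_sorted ks (fun x => x) false _).1 (List.getLast_mem hsne)

-- ===== VERDICT (by name: the statement is the Claim_ definition above) =====
theorem remap_span_spec : Claim_equal_remap_span := by
  intro start end_ mapping _
  unfold Spec_remap_span remap_span remap_span_alt
  dsimp only []
  set d := PySem.Dict.ofList mapping with hd
  set ks := d.keys with hks
  rw [pvFold_pair]
  by_cases hne : ks = []
  · -- empty dict: both sides are none
    have hitems : d.items = [] := by
      have : d.items.map Prod.fst = [] := hne
      exact List.map_eq_nil_iff.1 this
    rw [if_pos hitems]
    rw [hne]
    rfl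
  · have hitems : ¬ d.items = [] := by
      intro hc
      apply hne
      show d.items.map Prod.fst = []
      rw [hc]; rfl
    rw [if_neg hitems]
    obtain ⟨hmax_bound, hmax_mem⟩ := pvMaxKey_bound ks hne
    set max_key := PySem.List.pyGetD (PySem.List.sorted ks (fun x => x) false) (-1) 0 with hmk
    set p : Int → Bool := fun i => (d.get? i).isSome with hp
    have hpiff : ∀ i, p i = true ↔ i ∈ ks := fun i => pvIsSome_iff d i
    have hpfalse : ∀ i, i ∉ ks → p i = false := by
      intro i hi
      cases hpc : p i
      · rfl
      · exact absurd ((hpiff i).1 hpc) hi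
    rcases hlo : ks.foldl (pvStep1 start) none with _ | lo
    · -- no key ≥ start: A's upward scan finds nothing
      have hno : ∀ k ∈ ks, ¬ start ≤ k := ((pvFold1_none_iff start ks none).1 hlo).2
      have : (PySem.List.pyRange start (max_key + 1) 1).find? p = none := by
        apply pvFind_up_none
        intro i h1 _
        apply hpfalse
        intro hi
        exact hno i hi h1
      simp only [this, Option.map_none]
    · obtain ⟨hlo1, hlo2, _⟩ := pvFold1_some start ks none lo hlo
      have hlomem : lo ∈ ks ∧ start ≤ lo := by
        rcases hlo1 with h | h
        · exact h
        · simp at h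
      have hfind1 : (PySem.List.pyRange start (max_key + 1) 1).find? p = some lo := by
        apply pvFind_up_some p start (max_key + 1) lo hlomem.2 (by have := hmax_bound lo hlomem.1; omega) ((hpiff lo).2 hlomem.1)
        intro i h1 h2
        apply hpfalse
        intro hi
        have := hlo2 i hi h1
        omega
      rcases hhi : ks.foldl (pvStep2 end_) none with _ | hi
      · -- no key ≤ end-1: A's downward scan finds nothing
        have hno : ∀ k ∈ ks, ¬ k ≤ end_ - 1 := ((pvFold2_none_iff end_ ks none).1 hhi).2
        have : (PySem.List.pyRange (end_ - 1) (start - 1) (-1)).find? p = none := by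
          apply pvFind_down_none
          intro i _ h2
          apply hpfalse
          intro hi
          exact hno i hi h2
        simp only [hfind1, this, Option.map_some, Option.map_none]
      · obtain ⟨hhi1, hhi2, _⟩ := pvFold2_some end_ ks none hi hhi
        have hhimem : hi ∈ ks ∧ hi ≤ end_ - 1 := by
          rcases hhi1 with h | h
          · exact h
          · simp at h
        by_cases hlt : hi < start
        · -- largest key ≤ end-1 is below start: A's downward scan window holds no key
          have : (PySem.List.pyRange (end_ - 1) (start - 1) (-1)).find? p = none := by
            apply pvFind_down_none
            intro i h1 h2
            apply hpfalse
            intro hik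
            have := hhi2 i hik h2
            omega
          simp only [hfind1, this, Option.map_some, Option.map_none, if_pos hlt]
        · have hfind2 : (PySem.List.pyRange (end_ - 1) (start - 1) (-1)).find? p = some hi := by
            apply pvFind_down_some p (end_ - 1) (start - 1) hi (by omega) hhimem.2 ((hpiff hi).2 hhimem.1)
            intro i h1 h2
            apply hpfalse
            intro hik
            have := hhi2 i hik h2
            omega
          simp only [hfind1, hfind2, Option.map_some, if_neg hlt]
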